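-- pv_equiv track=rewrite | github.com/ronado2468-max/- | day29.py | filter_good_or_excellent
-- ===== SOURCE A (Python) =====
-- def sei_kazu(numbers):
--     result = [n for n in numbers if n > 0]
--
--     if not result:
--         return "NONE"
--
--     m = max(result)
--     if m >= 100:
--         status = "EXCELLENT"
--     elif m >= 50:
--         status = "GOOD"
--     else:
--         status = "OK"
--
--     return {
--         "max": m,
--         "status": status
--     }
--
-- def filter_good_or_excellent(data_list):
--     results = []
--
--     for numbers in data_list:
--         result = sei_kazu(numbers)
--
--         if result == "NONE":
--             continue
--
--         if result["status"] == "GOOD" or result["status"] == "EXCELLENT":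
--             results.append(numbers)
--
--     return results
-- ===== SOURCE B (Python) =====
-- def filter_good_or_excellent(data_list):
--     return [numbers for numbers in data_list if any(n >= 50 for n in numbers)]
-- ===== Notes on version B (the rewrite author's own statement) =====
-- stated objective: simpler
-- what changed: Replaced the build-positives-list / max / status-string pipeline with a single comprehension using a short-circuiting existence test (max positive >= 50 iff some element >= 50).
import Mathlib
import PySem

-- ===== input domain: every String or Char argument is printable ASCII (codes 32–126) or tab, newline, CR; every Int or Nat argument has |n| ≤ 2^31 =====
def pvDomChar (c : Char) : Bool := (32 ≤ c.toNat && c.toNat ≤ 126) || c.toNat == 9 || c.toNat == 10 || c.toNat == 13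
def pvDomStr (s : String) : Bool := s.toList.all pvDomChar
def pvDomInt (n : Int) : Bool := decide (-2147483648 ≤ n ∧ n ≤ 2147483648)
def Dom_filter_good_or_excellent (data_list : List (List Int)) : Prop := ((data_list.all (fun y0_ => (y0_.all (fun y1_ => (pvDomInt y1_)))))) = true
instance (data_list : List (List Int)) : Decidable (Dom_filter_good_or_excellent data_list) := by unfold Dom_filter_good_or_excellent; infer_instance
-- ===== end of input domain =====

-- B replaces A's positives-list/max/status pipeline with one comprehension using an existence test (max positive >= 50 iff some element >= 50); objective: simpler.
-- ===== PORT A =====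
-- sei_kazu returns "NONE" or a dict {max, status}; ported as Option (Int × String) with none = "NONE".
def sei_kazu (numbers : List Int) : Option (Int × String) :=
  let result := numbers.filter (fun n => n > 0)
  match PySem.List.max? result (fun x => x) with
  | none => none        -- result empty: "NONE"
  | some m =>
    let status := if m ≥ 100 then "EXCELLENT" else if m ≥ 50 then "GOOD" else "OK"
    some (m, status)

def filter_good_or_excellent (data_list : List (List Int)) : List (List Int) :=
  data_list.foldl (fun results numbers =>
    match sei_kazu numbers with
    | none => results
    | some (_, status) =>
      if status = "GOOD" ∨ status = "EXCELLENT" then results ++ [numbers] else results) []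

-- ===== PORT B =====
def filter_good_or_excellent_alt (data_list : List (List Int)) : List (List Int) :=
  data_list.filter (fun numbers => numbers.any (fun n => n ≥ 50))

-- ===== PRECONDITION & SPEC =====
def Spec_filter_good_or_excellent (data_list : List (List Int)) (out : List (List Int)) : Prop := out = filter_good_or_excellent_alt data_list
instance (data_list : List (List Int)) (out : List (List Int)) : Decidable (Spec_filter_good_or_excellent data_list out) := by unfold Spec_filter_good_or_excellent; infer_instance

-- ===== CLAIM (what is proved, stated in full; the proofs are below) =====
def Claim_equal_filter_good_or_excellent : Prop := ∀ (data_list : List (List Int)), Dom_filter_good_or_excellent data_list → Spec_filter_good_or_excellent data_list (filter_good_or_excellent data_list)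

-- ===== LEMMAS AND PROOFS =====

theorem sei_none {numbers : List Int} (h : sei_kazu numbers = none) :
    numbers.any (fun n => n ≥ 50) = false := by
  simp only [sei_kazu] at h
  cases hm : PySem.List.max? (numbers.filter (fun n => n > 0)) (fun x => x) with
  | some m => rw [hm] at h; simp at h
  | none =>
    have hemp := ((PySem.List.max?_eq_none_iff _ _).mp hm)
    rw [List.any_eq_false]
    intro n hn hc
    have hmem : n ∈ numbers.filter (fun n => n > 0) := by
      simp only [List.mem_filter, decide_eq_true_eq] at *
      exact ⟨hn, by omega⟩
    rw [hemp] at hmem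
    exact absurd hmem (List.not_mem_nil)

theorem sei_some {numbers : List Int} {m : Int} {status : String}
    (h : sei_kazu numbers = some (m, status)) :
    ((status = "GOOD" ∨ status = "EXCELLENT") ↔ numbers.any (fun n => n ≥ 50) = true) := by
  simp only [sei_kazu] at h
  cases hm : PySem.List.max? (numbers.filter (fun n => n > 0)) (fun x => x) with
  | none => rw [hm] at h; simp at h
  | some m' =>
    rw [hm] at h
    simp only [Option.some.injEq, Prod.mk.injEq] at h
    obtain ⟨hm', hstatus⟩ := h
    subst hm'
    subst hstatus
    have hmem := PySem.List.max?_mem hm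
    have hmax := PySem.List.max?_isMax hm
    simp only [List.mem_filter, decide_eq_true_eq] at hmem
    simp only [List.any_eq_true, decide_eq_true_eq]
    constructor
    · intro hst
      refine ⟨m', hmem.1, ?_⟩
      rcases hst with hst | hst <;> split_ifs at hst <;> first | omega | exact absurd hst (by decide)
    · rintro ⟨n, hn, h50⟩
      have hle : n ≤ m' := hmax n (by simp only [List.mem_filter, decide_eq_true_eq]; exact ⟨hn, by omega⟩)
      by_cases h100 : m' ≥ 100
      · right; simp [h100]
      · have h50' : m' ≥ 50 := by omega
        left; simp [h100, h50']

theorem step_eq (results : List (List Int)) (numbers : List Int) :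
    (match sei_kazu numbers with
     | none => results
     | some (_, status) =>
       if status = "GOOD" ∨ status = "EXCELLENT" then results ++ [numbers] else results)
    = if numbers.any (fun n => n ≥ 50) then results ++ [numbers] else results := by
  cases h : sei_kazu numbers with
  | none => simp [sei_none h]
  | some p =>
    obtain ⟨m, status⟩ := p
    have hiff := sei_some h
    by_cases hst : status = "GOOD" ∨ status = "EXCELLENT"
    · simp [hst, hiff.mp hst]
    · have hb : numbers.any (fun n => n ≥ 50) = false := by
        rcases Bool.eq_false_or_eq_true (numbers.any (fun n => n ≥ 50)) with hb | hb
        · exact absurd (hiff.mpr hb) hst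
        · exact hb
      simp [hst, hb]

theorem foldl_filter (data_list : List (List Int)) (acc : List (List Int)) :
    data_list.foldl (fun results numbers =>
      match sei_kazu numbers with
      | none => results
      | some (_, status) =>
        if status = "GOOD" ∨ status = "EXCELLENT" then results ++ [numbers] else results) acc
    = acc ++ data_list.filter (fun numbers => numbers.any (fun n => n ≥ 50)) := by
  induction data_list generalizing acc with
  | nil => simp
  | cons hd tl ih =>
    simp only [List.foldl_cons, List.filter_cons]
    rw [step_eq]
    by_cases hb : hd.any (fun n => n ≥ 50) = true
    · simp [hb, ih]
    · simp only [Bool.not_eq_true] at hb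
      simp [hb, ih]

-- ===== VERDICT (by name: the statement is the Claim_ definition above) =====
theorem filter_good_or_excellent_spec : Claim_equal_filter_good_or_excellent := by
  intro data_list _
  unfold Spec_filter_good_or_excellent filter_good_or_excellent filter_good_or_excellent_alt
  simpa using foldl_filter data_list []
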